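-- pv_equiv track=rewrite | github.com/pass-culture/pass-culture-main | api/src/pcapi/core/mails/transactional/pro/wake_up_after_inactivity_to_pro.py | _aggregate_duplicate_mails
-- ===== SOURCE A (Python) =====
-- def _aggregate_duplicate_mails(email_data_tuples: list[tuple[str, bool, bool]]) -> dict[str, dict[str, bool]]:
--     mail_params_by_email = {}
--     for email, can_last_offer_expire, is_last_offer_event in email_data_tuples:
--         if email not in mail_params_by_email:
--             mail_params_by_email[email] = {"CAN_EXPIRE": False, "IS_EVENT": False}
--         mail_params = mail_params_by_email[email]
--         mail_params_by_email[email] = {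
--             "CAN_EXPIRE": mail_params["CAN_EXPIRE"] or can_last_offer_expire,
--             "IS_EVENT": mail_params["IS_EVENT"] or is_last_offer_event,
--         }
--     return mail_params_by_email
-- ===== SOURCE B (Python) =====
-- def _aggregate_duplicate_mails(email_data_tuples: list[tuple[str, bool, bool]]) -> dict[str, dict[str, bool]]:
--     groups = {}
--     for email, can_last_offer_expire, is_last_offer_event in email_data_tuples:
--         groups.setdefault(email, []).append((can_last_offer_expire, is_last_offer_event))
--     return {
--         email: {
--             "CAN_EXPIRE": any(c for c, _ in pairs),
--             "IS_EVENT": any(e for _, e in pairs),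
--         }
--         for email, pairs in groups.items()
--     }
-- ===== Notes on version B (the rewrite author's own statement) =====
-- stated objective: alternative
-- what changed: Replaces the single-pass running-OR dict accumulator with a group-then-reduce shape: first pass groups each email's (can_expire, is_event) pairs into lists, second pass reduces each group with any().
import Mathlib
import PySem

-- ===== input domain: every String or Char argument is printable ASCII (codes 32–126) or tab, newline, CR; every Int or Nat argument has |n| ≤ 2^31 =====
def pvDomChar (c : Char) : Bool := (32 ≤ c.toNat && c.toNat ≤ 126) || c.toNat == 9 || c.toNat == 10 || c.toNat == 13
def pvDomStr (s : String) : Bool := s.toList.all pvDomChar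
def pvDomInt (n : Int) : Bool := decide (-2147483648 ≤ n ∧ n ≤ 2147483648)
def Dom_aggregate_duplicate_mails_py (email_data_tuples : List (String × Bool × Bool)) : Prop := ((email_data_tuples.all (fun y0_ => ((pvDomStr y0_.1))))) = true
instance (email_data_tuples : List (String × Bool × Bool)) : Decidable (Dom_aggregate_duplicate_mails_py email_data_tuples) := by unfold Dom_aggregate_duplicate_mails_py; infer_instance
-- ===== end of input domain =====

-- B changes the decomposition only: A keeps one running-OR dict, B groups pairs per email then reduces each group with any(); same cost.

-- ===== PORT A =====
-- one loop step of A: ensure the key exists with the default params, then overwrite with the ORed params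
def aggA_step (d : PySem.Dict String (PySem.Dict String Bool)) (t : String × Bool × Bool) :
    PySem.Dict String (PySem.Dict String Bool) :=
  let d1 := if d.contains t.1 then d
            else d.insert t.1 (PySem.Dict.ofList [("CAN_EXPIRE", false), ("IS_EVENT", false)])
  let mail_params := d1.getD t.1 PySem.Dict.empty
  d1.insert t.1 (PySem.Dict.ofList
    [("CAN_EXPIRE", mail_params.getD "CAN_EXPIRE" false || t.2.1),
     ("IS_EVENT", mail_params.getD "IS_EVENT" false || t.2.2)])

def aggregate_duplicate_mails_py (email_data_tuples : List (String × Bool × Bool)) : List (String × List (String × Bool)) :=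
  ((email_data_tuples.foldl aggA_step PySem.Dict.empty).items).map (fun p => (p.1, p.2.items))

-- ===== PORT B =====
def aggregate_duplicate_mails_py_alt (email_data_tuples : List (String × Bool × Bool)) : List (String × List (String × Bool)) :=
  (email_data_tuples.foldl (fun d t => d.modify t.1 [] (· ++ [t.2])) PySem.Dict.empty).items.map (fun g =>
    (g.1, [("CAN_EXPIRE", g.2.any (fun p => p.1)), ("IS_EVENT", g.2.any (fun p => p.2))]))

-- ===== PRECONDITION & SPEC =====
def Spec_aggregate_duplicate_mails_py (email_data_tuples : List (String × Bool × Bool)) (out : List (String × List (String × Bool))) : Prop := out = aggregate_duplicate_mails_py_alt email_data_tuples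
instance (email_data_tuples : List (String × Bool × Bool)) (out : List (String × List (String × Bool))) : Decidable (Spec_aggregate_duplicate_mails_py email_data_tuples out) := by unfold Spec_aggregate_duplicate_mails_py; infer_instance

-- ===== CLAIM (what is proved, stated in full; the proofs are below) =====
def Claim_equal_aggregate_duplicate_mails_py : Prop := ∀ (email_data_tuples : List (String × Bool × Bool)), Dom_aggregate_duplicate_mails_py email_data_tuples → Spec_aggregate_duplicate_mails_py email_data_tuples (aggregate_duplicate_mails_py email_data_tuples)

-- ===== LEMMAS AND PROOFS =====

-- canonical inner dict of A
def canonAgg (c e : Bool) : PySem.Dict String Bool :=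
  PySem.Dict.ofList [("CAN_EXPIRE", c), ("IS_EVENT", e)]

lemma canon_get_c (c e : Bool) :
    ((PySem.Dict.ofList [("CAN_EXPIRE", c), ("IS_EVENT", e)]).get? "CAN_EXPIRE").getD false = c := by rfl
lemma canon_get_e (c e : Bool) :
    ((PySem.Dict.ofList [("CAN_EXPIRE", c), ("IS_EVENT", e)]).get? "IS_EVENT").getD false = e := by rfl
lemma canon_items (c e : Bool) : (canonAgg c e).items = [("CAN_EXPIRE", c), ("IS_EVENT", e)] := by rfl

-- OR of the first / second flags of the tuples of l that carry key k
def orC (l : List (String × Bool × Bool)) (k : String) : Bool :=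
  (l.filter (fun t => t.1 == k)).any (fun t => t.2.1)
def orE (l : List (String × Bool × Bool)) (k : String) : Bool :=
  (l.filter (fun t => t.1 == k)).any (fun t => t.2.2)

lemma aggA_step_eq_insert (d : PySem.Dict String (PySem.Dict String Bool)) (t : String × Bool × Bool) :
    ∃ v, aggA_step d t = d.insert t.1 v := by
  unfold aggA_step
  by_cases h : d.contains t.1 = true
  · simp [h]
  · simp [h, PySem.Dict.insert_insert_self]

lemma aggA_get_some (l : List (String × Bool × Bool)) :
    ∀ (d : PySem.Dict String (PySem.Dict String Bool)) (k : String) (c e : Bool),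
    d.get? k = some (canonAgg c e) →
    (l.foldl aggA_step d).get? k = some (canonAgg (c || orC l k) (e || orE l k)) := by
  induction l with
  | nil => intro d k c e h; simp [orC, orE, h]
  | cons t rest ih =>
    intro d k c e h
    by_cases hk : t.1 = k
    · subst hk
      have hc : d.contains t.1 = true := by
        rw [PySem.Dict.contains_eq_isSome_get?, h]; rfl
      have hstep : aggA_step d t = d.insert t.1 (canonAgg (c || t.2.1) (e || t.2.2)) := by
        unfold aggA_step
        simp [hc, h, PySem.Dict.getD, canon_get_c, canon_get_e, canonAgg]
      rw [List.foldl_cons, hstep,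
        ih _ _ _ _ (PySem.Dict.get?_insert_self _ _ _)]
      simp [orC, orE, Bool.or_assoc]
    · have hstep : (aggA_step d t).get? k = d.get? k := by
        obtain ⟨v, hv⟩ := aggA_step_eq_insert d t
        rw [hv, PySem.Dict.get?_insert_of_ne _ _ (fun hh => hk hh.symm)]
      rw [List.foldl_cons, ih _ _ _ _ (by rw [hstep, h])]
      simp [orC, orE, hk]

lemma aggA_get_none (l : List (String × Bool × Bool)) :
    ∀ (d : PySem.Dict String (PySem.Dict String Bool)) (k : String),
    d.get? k = none → k ∈ l.map (fun t => t.1) →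
    (l.foldl aggA_step d).get? k = some (canonAgg (orC l k) (orE l k)) := by
  induction l with
  | nil => intro d k _ hm; simp at hm
  | cons t rest ih =>
    intro d k h hm
    by_cases hk : t.1 = k
    · subst hk
      have hc : d.contains t.1 = false := by
        rw [PySem.Dict.contains_eq_isSome_get?, h]; rfl
      have hstep : aggA_step d t = d.insert t.1 (canonAgg t.2.1 t.2.2) := by
        unfold aggA_step
        simp [hc, PySem.Dict.insert_insert_self, PySem.Dict.getD,
          PySem.Dict.get?_insert_self, canon_get_c, canon_get_e, canonAgg]
      rw [List.foldl_cons, hstep,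
        aggA_get_some rest _ _ _ _ (PySem.Dict.get?_insert_self _ _ _)]
      simp [orC, orE]
    · have hm' : k ∈ rest.map (fun t => t.1) := by
        simp at hm; rcases hm with h1 | h1
        · exact absurd h1.symm hk
        · simpa using h1
      obtain ⟨v, hv⟩ := aggA_step_eq_insert d t
      rw [List.foldl_cons, ih _ _ (by
        rw [hv, PySem.Dict.get?_insert_of_ne _ _ (fun hh => hk hh.symm), h]) hm']
      simp [orC, orE, hk]

-- keys of both folds
lemma aggA_keys (l : List (String × Bool × Bool)) :
    (l.foldl aggA_step PySem.Dict.empty).keys = PySem.Set.ofList (l.map (fun t => t.1)) := by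
  have h : ∀ (d : PySem.Dict String (PySem.Dict String Bool)),
      l.foldl aggA_step d = l.foldl (fun d t => d.insert t.1
        ((aggA_step d t).getD t.1 PySem.Dict.empty)) d := by
    induction l with
    | nil => intro d; rfl
    | cons t rest ih =>
      intro d
      obtain ⟨v, hv⟩ := aggA_step_eq_insert d t
      have : aggA_step d t = d.insert t.1 ((aggA_step d t).getD t.1 PySem.Dict.empty) := by
        rw [hv, PySem.Dict.getD_insert_self]
      rw [List.foldl_cons, List.foldl_cons, ← this, ih]
  rw [h, PySem.Dict.keys_foldl_insert_key, PySem.Dict.keys_empty, PySem.Set.update_nil_left]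

lemma aggA_nodup (l : List (String × Bool × Bool)) :
    (l.foldl aggA_step PySem.Dict.empty).keys.Nodup := by
  rw [aggA_keys]; exact PySem.Set.nodup_ofList _

lemma aggB_keys (l : List (String × Bool × Bool)) :
    (l.foldl (fun d t => d.modify t.1 [] (· ++ [t.2])) (PySem.Dict.empty (ν := List (Bool × Bool)))).keys
      = PySem.Set.ofList (l.map (fun t => t.1)) := by
  rw [PySem.Dict.keys_foldl_modify_key, PySem.Dict.keys_empty, PySem.Set.update_nil_left]

lemma aggB_nodup (l : List (String × Bool × Bool)) :
    (l.foldl (fun d t => d.modify t.1 [] (· ++ [t.2])) (PySem.Dict.empty (ν := List (Bool × Bool)))).keys.Nodup := by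
  rw [aggB_keys]; exact PySem.Set.nodup_ofList _

-- ===== VERDICT (by name: the statement is the Claim_ definition above) =====
theorem aggregate_duplicate_mails_py_spec : Claim_equal_aggregate_duplicate_mails_py := by
  intro l _
  unfold Spec_aggregate_duplicate_mails_py aggregate_duplicate_mails_py aggregate_duplicate_mails_py_alt
  rw [PySem.Dict.items_eq_map_keys _ (aggA_nodup l) PySem.Dict.empty,
      PySem.Dict.items_eq_map_keys _ (aggB_nodup l) []]
  rw [aggA_keys, aggB_keys]
  simp only [List.map_map]
  apply List.map_congr_left
  intro k hk
  have hk' : k ∈ l.map (fun t => t.1) := (PySem.Set.mem_ofList _ _).mp hk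
  have hA := aggA_get_none l PySem.Dict.empty k (PySem.Dict.get?_empty _) hk'
  have hB := PySem.Dict.getD_foldl_modify_append l PySem.Dict.empty k
  simp only [Function.comp]
  rw [PySem.Dict.getD_eq_get?_getD, hA, hB]
  simp [canon_items, orC, orE, List.any_map, Function.comp]
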